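-- pv_equiv track=rewrite | github.com/pdp10/sbpipe | sb_pipe/pipelines/pipeline.py | read_common_configuration
-- ===== SOURCE A (Python) =====
-- def read_common_configuration(lines):
--     """
--     Parse the common parameters from the configuration file
--
--     :return: return a tuple containing the common parameters
--     """
--     # default values
--     # Boolean flag
--     generate_data = True
--     # Boolean flag
--     analyse_data = True
--     # Boolean flag
--     generate_report = True
--     # the project directory
--     project_dir = ""
--     # the  model
--     model = "model"
--
--     # Initialises the variables
--     for line in lines:
--         # logger.info(line)
--         if line[0] == "generate_data":
--             generate_data = {'True': True, 'False': False}.get(line[1], False)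
--         elif line[0] == "analyse_data":
--             analyse_data = {'True': True, 'False': False}.get(line[1], False)
--         elif line[0] == "generate_report":
--             generate_report = {'True': True, 'False': False}.get(line[1], False)
--         elif line[0] == "project_dir":
--             project_dir = line[1]
--         elif line[0] == "model":
--             model = line[1]
--
--     return (generate_data, analyse_data, generate_report,
--             project_dir, model)
-- ===== SOURCE B (Python) =====
-- _KEYS = ("generate_data", "analyse_data", "generate_report", "project_dir", "model")
--
-- def _flag(found, key):
--     if key not in found:
--         return True
--     return {'True': True, 'False': False}.get(found[key], False)
--
-- def _assemble(found):
--     return (_flag(found, "generate_data"),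
--             _flag(found, "analyse_data"),
--             _flag(found, "generate_report"),
--             found.get("project_dir", ""),
--             found.get("model", "model"))
--
-- def read_common_configuration(lines):
--     found = {}
--     for line in lines:
--         if line[0] in _KEYS:
--             found[line[0]] = line[1]
--     return _assemble(found)
-- ===== Notes on version B (the rewrite author's own statement) =====
-- stated objective: simpler
-- what changed: Replaces the five-way if/elif chain updating five local variables with a two-phase design: one loop stores recognized key/value pairs in a dict (later occurrences overwrite), then the tuple is assembled from the dict with defaults for absent keys.
import Mathlib
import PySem

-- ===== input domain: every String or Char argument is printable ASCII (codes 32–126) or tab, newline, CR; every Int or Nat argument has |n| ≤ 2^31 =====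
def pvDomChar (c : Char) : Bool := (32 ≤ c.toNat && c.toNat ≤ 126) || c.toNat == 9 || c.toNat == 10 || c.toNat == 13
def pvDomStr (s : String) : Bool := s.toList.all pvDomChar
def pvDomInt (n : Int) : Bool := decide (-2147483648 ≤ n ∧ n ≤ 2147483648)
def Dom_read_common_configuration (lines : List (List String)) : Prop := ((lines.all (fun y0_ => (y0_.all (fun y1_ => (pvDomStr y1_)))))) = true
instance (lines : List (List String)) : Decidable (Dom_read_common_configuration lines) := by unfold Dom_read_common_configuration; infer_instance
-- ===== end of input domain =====

-- B is a two-phase rewrite: one loop storing recognized key/value pairs into a dict, then the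
-- result tuple is assembled from the dict with the defaults for absent keys (objective: simpler).

-- ===== PORT A =====
-- A's per-line update of the five local variables, branches in Python's order.
def rccStepA (st : Bool × Bool × Bool × String × String) (line : List String) :
    Bool × Bool × Bool × String × String :=
  let l0 := (PySem.List.pyGet? line 0).getD ""
  match st with
  | (gd, ad, gr, pd, m) =>
    if l0 = "generate_data" then
      ((PySem.Dict.ofList [("True", true), ("False", false)]).getD ((PySem.List.pyGet? line 1).getD "") false, ad, gr, pd, m)
    else if l0 = "analyse_data" then
      (gd, (PySem.Dict.ofList [("True", true), ("False", false)]).getD ((PySem.List.pyGet? line 1).getD "") false, gr, pd, m)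
    else if l0 = "generate_report" then
      (gd, ad, (PySem.Dict.ofList [("True", true), ("False", false)]).getD ((PySem.List.pyGet? line 1).getD "") false, pd, m)
    else if l0 = "project_dir" then
      (gd, ad, gr, (PySem.List.pyGet? line 1).getD "", m)
    else if l0 = "model" then
      (gd, ad, gr, pd, (PySem.List.pyGet? line 1).getD "")
    else (gd, ad, gr, pd, m)

def read_common_configuration (lines : List (List String)) : Bool × Bool × Bool × String × String :=
  lines.foldl rccStepA (true, true, true, "", "model")

-- ===== PORT B =====
def rccKeys : List String := ["generate_data", "analyse_data", "generate_report", "project_dir", "model"]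

-- B's loop body: store the line's value under its key if the key is recognized.
def rccStepB (d : PySem.Dict String String) (line : List String) : PySem.Dict String String :=
  let k := (PySem.List.pyGet? line 0).getD ""
  if rccKeys.contains k then d.insert k ((PySem.List.pyGet? line 1).getD "") else d

-- B's _flag: default True when absent, else {'True':…,'False':…}.get(value, False).
def rccFlag (d : PySem.Dict String String) (k : String) : Bool :=
  match d.get? k with
  | none => true
  | some v => (PySem.Dict.ofList [("True", true), ("False", false)]).getD v false

-- B's _assemble.
def rccAssemble (d : PySem.Dict String String) : Bool × Bool × Bool × String × String :=
  (rccFlag d "generate_data", rccFlag d "analyse_data", rccFlag d "generate_report",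
   (d.get? "project_dir").getD "", (d.get? "model").getD "model")

def read_common_configuration_alt (lines : List (List String)) : Bool × Bool × Bool × String × String :=
  rccAssemble (lines.foldl rccStepB PySem.Dict.empty)

-- ===== PRECONDITION & SPEC =====
-- Pre_ excludes exactly the inputs where Python A raises IndexError: an empty line (line[0]),
-- or a line whose first element is a recognized key but which has no second element (line[1]).
-- B raises on exactly the same inputs.
def Pre_read_common_configuration (lines : List (List String)) : Prop :=
  ∀ line ∈ lines, line ≠ [] ∧ (line.headD "" ∈ rccKeys → 2 ≤ line.length)
instance (lines : List (List String)) : Decidable (Pre_read_common_configuration lines) := by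
  unfold Pre_read_common_configuration; infer_instance

def pvWitness_read_common_configuration : List (List String) :=
  [["generate_data", "False"], ["junk"], ["model", "m1"], ["model", "m2"]]

def Spec_read_common_configuration (lines : List (List String)) (out : Bool × Bool × Bool × String × String) : Prop := out = read_common_configuration_alt lines
instance (lines : List (List String)) (out : Bool × Bool × Bool × String × String) : Decidable (Spec_read_common_configuration lines out) := by unfold Spec_read_common_configuration; infer_instance

-- ===== CLAIM (what is proved, stated in full; the proofs are below) =====
def Claim_equal_read_common_configuration : Prop := ∀ (lines : List (List String)), Dom_read_common_configuration lines → Pre_read_common_configuration lines → Spec_read_common_configuration lines (read_common_configuration lines)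

-- ===== LEMMAS AND PROOFS =====

-- One step of A's fold, started from the view of B's dict, is the view of one step of B's fold.
lemma rcc_step_comm (d : PySem.Dict String String) (line : List String) :
    rccStepA (rccAssemble d) line = rccAssemble (rccStepB d line) := by
  unfold rccStepA rccStepB rccAssemble rccFlag
  by_cases h1 : (PySem.List.pyGet? line 0).getD "" = "generate_data"
  · simp [h1, rccKeys, PySem.Dict.get?_insert]
  · by_cases h2 : (PySem.List.pyGet? line 0).getD "" = "analyse_data"
    · simp [h2, rccKeys, PySem.Dict.get?_insert]
    · by_cases h3 : (PySem.List.pyGet? line 0).getD "" = "generate_report"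
      · simp [h3, rccKeys, PySem.Dict.get?_insert]
      · by_cases h4 : (PySem.List.pyGet? line 0).getD "" = "project_dir"
        · simp [h4, rccKeys, PySem.Dict.get?_insert]
        · by_cases h5 : (PySem.List.pyGet? line 0).getD "" = "model"
          · simp [h5, rccKeys, PySem.Dict.get?_insert]
          · simp [h1, h2, h3, h4, h5, rccKeys]

lemma rcc_foldl_comm (lines : List (List String)) (d : PySem.Dict String String) :
    lines.foldl rccStepA (rccAssemble d) = rccAssemble (lines.foldl rccStepB d) := by
  induction lines generalizing d with
  | nil => rfl
  | cons l ls ih => simp only [List.foldl_cons, rcc_step_comm, ih]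

-- ===== VERDICT (by name: the statement is the Claim_ definition above) =====
theorem read_common_configuration_spec : Claim_equal_read_common_configuration := by
  intro lines _ _
  unfold Spec_read_common_configuration read_common_configuration read_common_configuration_alt
  have h0 : (true, true, true, "", "model") = rccAssemble PySem.Dict.empty := by decide
  rw [h0, rcc_foldl_comm]
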